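-- pv_equiv track=rewrite | github.com/tztechno/tz_atcoder | calc_grundy.py | nim_winner
-- ===== SOURCE A (Python) =====
-- def calculate_grundy(n):
--     if n == 0:
--         return 0
--
--     grundy_set = set()
--
--     for i in range(1, n + 1):
--         next_nimber = calculate_grundy(n - i)
--         grundy_set.add(next_nimber)
--
--     mex = 0
--     while mex in grundy_set:
--         mex += 1
--
--     return mex
--
-- def nim_winner(piles):
--     nim_sum = 0
--     for pile_size in piles:
--         nim_sum ^= calculate_grundy(pile_size)
--
--     if nim_sum == 0:
--         return "Second"
--     else:
--         return "First"
-- ===== SOURCE B (Python) =====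
-- def nim_winner(piles):
--     # grundy(n) = n for n >= 0 (subtraction game where any number of stones
--     # may be removed), and empty/negative piles contribute nothing, so the
--     # winner is decided by the XOR of the positive pile sizes.
--     nim_sum = 0
--     for p in piles:
--         if p > 0:
--             nim_sum ^= p
--     return "Second" if nim_sum == 0 else "First"
-- ===== Notes on version B (the rewrite author's own statement) =====
-- stated objective: faster
-- what changed: Replaces the exponential recursive grundy computation by the closed form grundy(n)=n (0 for non-positive piles) and directly XORs the positive pile sizes; intended as asymptotically faster (a timing run could not measure a ratio: A already times out at piles of size ~16 where B answers instantly); Pre_ excludes piles >= 998, where A raises RecursionError.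
import Mathlib
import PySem

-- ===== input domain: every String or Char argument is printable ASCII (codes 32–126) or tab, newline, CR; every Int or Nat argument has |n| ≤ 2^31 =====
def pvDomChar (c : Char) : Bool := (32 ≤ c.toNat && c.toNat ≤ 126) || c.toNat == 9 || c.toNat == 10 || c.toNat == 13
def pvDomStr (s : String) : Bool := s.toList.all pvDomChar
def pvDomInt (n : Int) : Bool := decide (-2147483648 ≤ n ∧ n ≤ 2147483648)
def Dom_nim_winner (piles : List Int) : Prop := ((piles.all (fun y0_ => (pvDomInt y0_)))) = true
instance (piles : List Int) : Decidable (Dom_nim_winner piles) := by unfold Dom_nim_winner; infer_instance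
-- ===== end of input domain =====

-- B replaces A's exponential recursive grundy computation by the closed form grundy(n)=n
-- (0 for non-positive piles) and XORs the positive pile sizes directly (objective: faster; intended asymptotic speed-up, unconfirmed in a timing run since A times out on that run's larger inputs).


-- ===== PORT A =====
-- 'while mex in grundy_set: mex += 1' — fuel s.length + 1 is exact: the set is duplicate-free
-- and mex takes strictly increasing values, so the loop body runs at most s.length times.
def mexLoop (s : List Int) (mex : Int) : Nat → Int
  | 0 => mex
  | fuel + 1 => if mex ∈ s then mexLoop s (mex + 1) fuel else mex

def calculate_grundy (n : Int) : Int :=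
  if n = 0 then 0
  else
    let gset := (PySem.List.pyRange 1 (n + 1) 1).attach.foldl
      (fun s i => PySem.Set.add s (calculate_grundy (n - i.1))) PySem.Set.empty
    mexLoop gset 0 (gset.length + 1)
termination_by n.toNat
decreasing_by
  have h := (PySem.List.mem_pyRange_one).1 i.2
  omega

def nim_winner (piles : List Int) : String :=
  let nim_sum := piles.foldl (fun acc p => PySem.Int.bxor acc (calculate_grundy p)) 0
  if nim_sum = 0 then "Second" else "First"

-- ===== PORT B =====
def nim_winner_alt (piles : List Int) : String :=
  let nim_sum := piles.foldl (fun acc p => if p > 0 then PySem.Int.bxor acc p else acc) 0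
  if nim_sum = 0 then "Second" else "First"

-- ===== PRECONDITION & SPEC =====
-- Pre_ excludes piles of size 998 or more: there A's unmemoized linear first descent
-- exceeds Python's default recursion limit (1000) and raises RecursionError.
def Pre_nim_winner (piles : List Int) : Prop := ∀ p ∈ piles, p ≤ 997
instance (piles : List Int) : Decidable (Pre_nim_winner piles) := by unfold Pre_nim_winner; infer_instance
def pvWitness_nim_winner : List Int := [0, 1, 2, 3, -5]

def Spec_nim_winner (piles : List Int) (out : String) : Prop := out = nim_winner_alt piles
instance (piles : List Int) (out : String) : Decidable (Spec_nim_winner piles out) := by unfold Spec_nim_winner; infer_instance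

-- ===== CLAIM (what is proved, stated in full; the proofs are below) =====
def Claim_equal_nim_winner : Prop := ∀ (piles : List Int), Dom_nim_winner piles → Pre_nim_winner piles → Spec_nim_winner piles (nim_winner piles)

-- ===== LEMMAS AND PROOFS =====

-- the attached fold in the port equals the plain fold (List.foldl_attach, instantiated so it rewrites)
theorem foldl_attach_grundy (n : Int) (l : List Int) (s : PySem.Set Int) :
    l.attach.foldl (fun s i => PySem.Set.add s (calculate_grundy (n - i.1))) s
    = l.foldl (fun s i => PySem.Set.add s (calculate_grundy (n - i))) s :=
  List.foldl_attach (f := fun s i => PySem.Set.add s (calculate_grundy (n - i)))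

-- the grundy set built for n ≥ 1 is exactly {0, …, n-1}
theorem gset_spec (n : Int) (hn : 0 < n)
    (ih : ∀ m : Int, m.toNat < n.toNat → calculate_grundy m = if 0 < m then m else 0) :
    ∀ x, (x ∈ (PySem.List.pyRange 1 (n + 1) 1).foldl
      (fun s i => PySem.Set.add s (calculate_grundy (n - i))) PySem.Set.empty) ↔ 0 ≤ x ∧ x < n := by
  intro x
  rw [PySem.Set.mem_foldl_add]
  constructor
  · rintro (h | ⟨i, hi, rfl⟩)
    · simp [PySem.Set.empty] at h
    · have hm := (PySem.List.mem_pyRange_one).1 hi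
      rw [ih (n - i) (by omega)]
      split_ifs <;> omega
  · intro hx
    refine Or.inr ⟨n - x, (PySem.List.mem_pyRange_one).2 (by omega), ?_⟩
    rw [ih (n - (n - x)) (by omega)]
    split_ifs <;> omega

theorem mexLoop_spec (s : List Int) (n : Int)
    (hmem : ∀ x, x ∈ s ↔ 0 ≤ x ∧ x < n) :
    ∀ (fuel : Nat) (m : Int), 0 ≤ m → m ≤ n → (n - m).toNat < fuel → mexLoop s m fuel = n := by
  intro fuel
  induction fuel with
  | zero => intro m _ _ h; omega
  | succ f ihf =>
    intro m hm0 hmn hfu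
    unfold mexLoop
    by_cases h : m ∈ s
    · have := (hmem m).1 h
      rw [if_pos h]
      exact ihf (m + 1) (by omega) (by omega) (by omega)
    · have : ¬(0 ≤ m ∧ m < n) := fun hc => h ((hmem m).2 hc)
      rw [if_neg h]; omega

theorem calculate_grundy_closed (n : Int) : calculate_grundy n = if 0 < n then n else 0 := by
  induction hk : n.toNat using Nat.strong_induction_on generalizing n with
  | _ k ih =>
  subst hk
  have ih' : ∀ m : Int, m.toNat < n.toNat → calculate_grundy m = if 0 < m then m else 0 :=
    fun m hm => ih m.toNat hm m rfl
  by_cases hn : n = 0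
  · subst hn; simp [calculate_grundy]
  rw [calculate_grundy, if_neg hn]
  by_cases hpos : 0 < n
  · rw [if_pos hpos]
    simp only [foldl_attach_grundy]
    set gs := (PySem.List.pyRange 1 (n + 1) 1).foldl
      (fun s i => PySem.Set.add s (calculate_grundy (n - i))) PySem.Set.empty with hgs
    have hmem : ∀ x, x ∈ gs ↔ 0 ≤ x ∧ x < n := gset_spec n hpos ih'
    have hnd : gs.Nodup := by
      rw [hgs]
      have : ∀ (l : List Int) (s : List Int), s.Nodup →
          (l.foldl (fun s i => PySem.Set.add s (calculate_grundy (n - i))) s).Nodup := by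
        intro l
        induction l with
        | nil => intro s hs; exact hs
        | cons a t iht =>
          intro s hs
          simp only [List.foldl_cons]
          exact iht _ (PySem.Set.nodup_add _ _ hs)
      exact this _ _ List.nodup_nil
    have hperm : gs.Perm (PySem.List.pyRange 0 n 1) := by
      rw [List.perm_ext_iff_of_nodup hnd (PySem.List.nodup_pyRange_one 0 n)]
      intro x
      rw [hmem, PySem.List.mem_pyRange_one]
    have hlen : gs.length = n.toNat := by
      rw [hperm.length_eq, PySem.List.length_pyRange_one]; omega
    exact mexLoop_spec gs n hmem (gs.length + 1) 0 le_rfl (by omega) (by omega)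
  · rw [if_neg hpos]
    have hempty : PySem.List.pyRange 1 (n + 1) 1 = [] :=
      PySem.List.pyRange_one_eq_nil (by omega)
    simp only [foldl_attach_grundy, hempty]
    simp [PySem.Set.empty, mexLoop]

theorem foldl_grundy_eq (piles : List Int) :
    ∀ acc : Int, piles.foldl (fun acc p => PySem.Int.bxor acc (calculate_grundy p)) acc =
      piles.foldl (fun acc p => if p > 0 then PySem.Int.bxor acc p else acc) acc := by
  induction piles with
  | nil => intro acc; rfl
  | cons p t iht =>
    intro acc
    simp only [List.foldl_cons]
    rw [calculate_grundy_closed]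
    by_cases hp : 0 < p
    · rw [if_pos hp, if_pos hp, iht]
    · rw [if_neg hp, if_neg hp, PySem.Int.bxor_zero, iht]

-- ===== VERDICT (by name: the statement is the Claim_ definition above) =====
theorem nim_winner_spec : Claim_equal_nim_winner := by
  intro piles _ _
  unfold Spec_nim_winner nim_winner nim_winner_alt
  rw [foldl_grundy_eq]
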